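-- pv_equiv track=rewrite | github.com/hainamt/cti_kg | utils/token.py | align_pos_ids_with_tokens
-- ===== SOURCE A (Python) =====
-- def align_pos_ids_with_tokens(tokens, pos_ids, delimiter="Ġ"):
--     aligned_pos_tags = []
--     word_index = 0
--     for token in tokens:
--         if token.startswith(delimiter) or word_index == 0:
--             aligned_pos_tags.append(pos_ids[word_index])
--             word_index += 1
--         else:
--             aligned_pos_tags.append(pos_ids[word_index - 1])
--     return aligned_pos_tags
-- ===== SOURCE B (Python) =====
-- def align_pos_ids_with_tokens(tokens, pos_ids, delimiter="Ġ"):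
--     # two-pointer run scan: for each word, find the end of its subword run,
--     # then emit that word's pos id replicated over the whole run at once
--     out = []
--     w = 0
--     rest = tokens
--     while rest:
--         k = 1
--         while k < len(rest) and not rest[k].startswith(delimiter):
--             k += 1
--         out += [pos_ids[w]] * k
--         w += 1
--         rest = rest[k:]
--     return out
-- ===== Notes on version B (the rewrite author's own statement) =====
-- stated objective: alternative
-- what changed: Replaces A's per-token loop (branching on a running word counter and back-indexing pos_ids[word_index-1]) with a two-pointer run scan: an inner pointer finds the end of each word's subword run and the word's pos id is emitted once, replicated over the whole run, consuming one pos id per run.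
import Mathlib
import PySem

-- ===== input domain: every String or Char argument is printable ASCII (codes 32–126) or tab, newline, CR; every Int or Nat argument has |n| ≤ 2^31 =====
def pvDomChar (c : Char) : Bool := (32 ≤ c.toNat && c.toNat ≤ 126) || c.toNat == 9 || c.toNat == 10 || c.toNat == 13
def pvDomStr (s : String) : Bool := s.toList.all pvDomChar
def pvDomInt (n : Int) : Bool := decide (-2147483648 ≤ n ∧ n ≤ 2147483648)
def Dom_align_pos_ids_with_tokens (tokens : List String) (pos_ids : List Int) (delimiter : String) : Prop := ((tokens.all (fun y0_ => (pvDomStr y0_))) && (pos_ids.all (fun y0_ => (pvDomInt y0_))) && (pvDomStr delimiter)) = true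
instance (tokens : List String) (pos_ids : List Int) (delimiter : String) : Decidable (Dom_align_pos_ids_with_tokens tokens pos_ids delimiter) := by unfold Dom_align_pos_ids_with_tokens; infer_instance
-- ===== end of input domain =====

-- B replaces A's per-token counter loop with a two-pointer run scan: each word's
-- subword run is located by an inner pointer and its pos id replicated over the run ("alternative").

-- ===== PORT A =====
-- one loop step of A: state = (aligned_pos_tags, word_index)
def pvStepA (pos_ids : List Int) (delimiter : String) (s : List Int × Int) (token : String) : List Int × Int :=
  if PySem.Str.startswith token delimiter || s.2 == 0 then
    (s.1 ++ [(PySem.List.pyGet? pos_ids s.2).getD 0], s.2 + 1)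
  else
    (s.1 ++ [(PySem.List.pyGet? pos_ids (s.2 - 1)).getD 0], s.2)

def align_pos_ids_with_tokens (tokens : List String) (pos_ids : List Int) (delimiter : String) : List Int :=
  (tokens.foldl (pvStepA pos_ids delimiter) ([], 0)).1

-- ===== PORT B =====
-- the inner while: how many leading tokens of the tail do NOT start with the delimiter
-- (in Source B: k walks from 1 while rest[k] does not start with delimiter; pvCont counts rest[1:]'s prefix)
def pvCont (delimiter : String) : List String → Nat
  | [] => 0
  | t :: ts => if PySem.Str.startswith t delimiter then 0 else pvCont delimiter ts + 1

-- the outer while on rest: emit pos_ids[w] replicated over the run, advance rest by the run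
def pvLoopB (pos_ids : List Int) (delimiter : String) : Int → List String → List Int
  | _, [] => []
  | w, _t :: ts =>
    let k := pvCont delimiter ts
    List.replicate (k + 1) ((PySem.List.pyGet? pos_ids w).getD 0)
      ++ pvLoopB pos_ids delimiter (w + 1) (ts.drop k)
termination_by _ rest => rest.length
decreasing_by simp

def align_pos_ids_with_tokens_alt (tokens : List String) (pos_ids : List Int) (delimiter : String) : List Int :=
  pvLoopB pos_ids delimiter 0 tokens

-- ===== PRECONDITION & SPEC =====
-- Pre_ excludes exactly the inputs on which Python A raises IndexError: more word boundaries
-- (first token, or a token starting with the delimiter) than pos_ids has entries.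
def Pre_align_pos_ids_with_tokens (tokens : List String) (pos_ids : List Int) (delimiter : String) : Prop :=
  (tokens.drop 1).countP (fun t => PySem.Str.startswith t delimiter) + (if tokens = [] then 0 else 1) ≤ pos_ids.length
instance (tokens : List String) (pos_ids : List Int) (delimiter : String) : Decidable (Pre_align_pos_ids_with_tokens tokens pos_ids delimiter) := by unfold Pre_align_pos_ids_with_tokens; infer_instance

def pvWitness_align_pos_ids_with_tokens : List String × List Int × String := (["a", "Xb", "c"], [5, 7], "X")

def Spec_align_pos_ids_with_tokens (tokens : List String) (pos_ids : List Int) (delimiter : String) (out : List Int) : Prop := out = align_pos_ids_with_tokens_alt tokens pos_ids delimiter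
instance (tokens : List String) (pos_ids : List Int) (delimiter : String) (out : List Int) : Decidable (Spec_align_pos_ids_with_tokens tokens pos_ids delimiter out) := by unfold Spec_align_pos_ids_with_tokens; infer_instance

-- ===== CLAIM (what is proved, stated in full; the proofs are below) =====
def Claim_equal_align_pos_ids_with_tokens : Prop := ∀ (tokens : List String) (pos_ids : List Int) (delimiter : String), Dom_align_pos_ids_with_tokens tokens pos_ids delimiter → Pre_align_pos_ids_with_tokens tokens pos_ids delimiter → Spec_align_pos_ids_with_tokens tokens pos_ids delimiter (align_pos_ids_with_tokens tokens pos_ids delimiter)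

-- ===== LEMMAS AND PROOFS =====

lemma pvLoopB_nil (pos_ids : List Int) (delimiter : String) (w : Int) :
    pvLoopB pos_ids delimiter w [] = [] := by
  rw [pvLoopB.eq_def]

lemma pvLoopB_cons (pos_ids : List Int) (delimiter : String) (w : Int) (t : String) (ts : List String) :
    pvLoopB pos_ids delimiter w (t :: ts)
      = List.replicate (pvCont delimiter ts + 1) ((PySem.List.pyGet? pos_ids w).getD 0)
          ++ pvLoopB pos_ids delimiter (w + 1) (ts.drop (pvCont delimiter ts)) := by
  rw [pvLoopB.eq_def]

-- A's tail fold (word_index n ≥ 1) = replicate the previous word's id over the current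
-- non-boundary run, then continue run-wise like B.
lemma pvFoldA_tail (pos_ids : List Int) (delimiter : String) (ts : List String) :
    ∀ (acc : List Int) (n : Int), 1 ≤ n →
      (ts.foldl (pvStepA pos_ids delimiter) (acc, n)).1
        = acc ++ List.replicate (pvCont delimiter ts) ((PySem.List.pyGet? pos_ids (n - 1)).getD 0)
              ++ pvLoopB pos_ids delimiter n (ts.drop (pvCont delimiter ts)) := by
  induction ts with
  | nil => intro acc n _; simp [pvCont, pvLoopB_nil]
  | cons t ts ih =>
    intro acc n hn
    have hz : (n == 0) = false := by simp; omega
    by_cases hc : PySem.Chars.startswith t.toList delimiter.toList = true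
    · have hstep : pvStepA pos_ids delimiter (acc, n) t
          = (acc ++ [(PySem.List.pyGet? pos_ids n).getD 0], n + 1) := by
        simp [pvStepA, hc]
      rw [List.foldl_cons, hstep, ih _ (n + 1) (by omega)]
      simp [pvCont, hc, pvLoopB_cons, List.replicate_succ]
    · have hcf : PySem.Chars.startswith t.toList delimiter.toList = false := by
        rwa [Bool.not_eq_true] at hc
      have hstep : pvStepA pos_ids delimiter (acc, n) t
          = (acc ++ [(PySem.List.pyGet? pos_ids (n - 1)).getD 0], n) := by
        simp [pvStepA, hcf, hz]
      rw [List.foldl_cons, hstep, ih _ n hn]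
      simp [pvCont, hcf, List.replicate_succ]

-- ===== VERDICT (by name: the statement is the Claim_ definition above) =====
theorem align_pos_ids_with_tokens_spec : Claim_equal_align_pos_ids_with_tokens := by
  intro tokens pos_ids delimiter _ _
  unfold Spec_align_pos_ids_with_tokens align_pos_ids_with_tokens align_pos_ids_with_tokens_alt
  cases tokens with
  | nil => simp [pvLoopB_nil]
  | cons t ts =>
    have hstep : pvStepA pos_ids delimiter ([], 0) t
        = ([(PySem.List.pyGet? pos_ids 0).getD 0], 1) := by
      simp [pvStepA]
    rw [List.foldl_cons, hstep, pvFoldA_tail pos_ids delimiter ts _ 1 le_rfl, pvLoopB_cons]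
    simp [List.replicate_succ]
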